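-- pv_equiv track=rewrite | github.com/Kantti/KATI | syntax_resources.py | expanding_iteration
-- ===== SOURCE A (Python) =====
-- def expanding_iteration(words, word, debug=False):
--     res = []
--     stop_left = False
--     stop_right = False
--     start = words.index(word)
--     for i in range(1, 100):
--         if start-i >= 0: res.append(start-i)
--         else: stop_left = True
--
--         if start+i <= len(words)-1: res.append(start+i)
--         else: stop_right = True
--
--         if stop_right == True and stop_left == True: break
--
--     return res
-- ===== SOURCE B (Python) =====
-- def expanding_iteration(words, word, debug=False):
--     start = words.index(word)
--     left = [start - i for i in range(1, 100) if start - i >= 0]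
--     right = [start + i for i in range(1, 100) if start + i <= len(words) - 1]
--     res = []
--     for l, r in zip(left, right):
--         res.append(l)
--         res.append(r)
--     k = min(len(left), len(right))
--     return res + left[k:] + right[k:]
-- ===== Notes on version B (the rewrite author's own statement) =====
-- stated objective: simpler
-- what changed: Replaces A's single loop with stop_left/stop_right flags and break by computing the bounded left and right index lists separately (two comprehensions over range(1,100)) and interleaving them with zip plus the leftover tails.
import Mathlib
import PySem

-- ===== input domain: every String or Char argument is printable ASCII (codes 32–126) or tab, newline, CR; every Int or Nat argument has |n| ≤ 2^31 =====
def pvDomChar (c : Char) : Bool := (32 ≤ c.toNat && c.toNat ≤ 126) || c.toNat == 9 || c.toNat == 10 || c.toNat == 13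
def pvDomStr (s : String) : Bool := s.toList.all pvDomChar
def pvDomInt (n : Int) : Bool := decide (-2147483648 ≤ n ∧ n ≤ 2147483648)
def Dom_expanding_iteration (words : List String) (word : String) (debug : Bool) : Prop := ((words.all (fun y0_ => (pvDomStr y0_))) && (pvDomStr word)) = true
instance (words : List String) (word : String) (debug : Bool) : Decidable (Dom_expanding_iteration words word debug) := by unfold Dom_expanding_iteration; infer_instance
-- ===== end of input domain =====

-- B replaces A's single loop with stop flags by two bounded index comprehensions that are
-- then interleaved (zip + leftovers) — a simpler decomposition, same cost.

-- ===== PORT A =====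
-- the for-loop over range(1,100): state (stop_left, stop_right), 'break' returns immediately
def pvALoop (start n : Int) : List Int → Bool → Bool → List Int
  | [], _, _ => []
  | i :: rest, sl, sr =>
    let p1 : List Int × Bool := if start - i ≥ 0 then ([start - i], sl) else ([], true)
    let p2 : List Int × Bool := if start + i ≤ n - 1 then ([start + i], sr) else ([], true)
    p1.1 ++ p2.1 ++ (if p2.2 && p1.2 then [] else pvALoop start n rest p1.2 p2.2)

def expanding_iteration (words : List String) (word : String) (debug : Bool) : List Int :=
  match PySem.List.index? words word with
  | none => []   -- words.index raises ValueError here; excluded by Pre_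
  | some s => pvALoop (s : Int) (words.length : Int) (PySem.List.pyRange 1 100 1) false false

-- ===== PORT B =====
def expanding_iteration_alt (words : List String) (word : String) (debug : Bool) : List Int :=
  match PySem.List.index? words word with
  | none => []   -- ValueError; excluded by Pre_
  | some s =>
    let start : Int := (s : Int)
    let left : List Int := (PySem.List.pyRange 1 100 1).filterMap
      (fun i => if start - i ≥ 0 then some (start - i) else none)
    let right : List Int := (PySem.List.pyRange 1 100 1).filterMap
      (fun i => if start + i ≤ (words.length : Int) - 1 then some (start + i) else none)
    let res : List Int := (left.zip right).foldl (fun acc p => acc ++ [p.1, p.2]) []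
    let k : Nat := min left.length right.length
    -- left[k:] / right[k:] with 0 ≤ k ≤ len: exactly List.drop
    res ++ left.drop k ++ right.drop k

-- ===== PRECONDITION & SPEC =====
-- Pre_ excludes only inputs where A raises ValueError (word not present)
def Pre_expanding_iteration (words : List String) (word : String) (debug : Bool) : Prop :=
  word ∈ words
instance (words : List String) (word : String) (debug : Bool) : Decidable (Pre_expanding_iteration words word debug) := by unfold Pre_expanding_iteration; infer_instance

def pvWitness_expanding_iteration : List String × String × Bool := (["a", "b", "c"], "b", false)

def Spec_expanding_iteration (words : List String) (word : String) (debug : Bool) (out : List Int) : Prop := out = expanding_iteration_alt words word debug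
instance (words : List String) (word : String) (debug : Bool) (out : List Int) : Decidable (Spec_expanding_iteration words word debug out) := by unfold Spec_expanding_iteration; infer_instance

-- ===== CLAIM (what is proved, stated in full; the proofs are below) =====
def Claim_equal_expanding_iteration : Prop := ∀ (words : List String) (word : String) (debug : Bool), Dom_expanding_iteration words word debug → Pre_expanding_iteration words word debug → Spec_expanding_iteration words word debug (expanding_iteration words word debug)

-- ===== LEMMAS AND PROOFS =====

-- proof-side helpers: generalized suffixes of B's two comprehensions, and the interleaving
def pvLeftF (start i : Int) : List Int :=
  (PySem.List.pyRange i 100 1).filterMap (fun j => if start - j ≥ 0 then some (start - j) else none)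
def pvRightF (start n i : Int) : List Int :=
  (PySem.List.pyRange i 100 1).filterMap (fun j => if start + j ≤ n - 1 then some (start + j) else none)

def pvInterleave (l r : List Int) : List Int :=
  match l with
  | [] => r
  | x :: xs => x :: pvInterleave r xs
termination_by l.length + r.length
decreasing_by simp; omega

lemma pvInterleave_nil (r : List Int) : pvInterleave [] r = r := by rw [pvInterleave]

lemma pvInterleave_cons (x : Int) (xs r : List Int) : pvInterleave (x :: xs) r = x :: pvInterleave r xs := by
  rw [pvInterleave]

lemma pvInterleave_nil_right (l : List Int) : pvInterleave l [] = l := by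
  cases l with
  | nil => rw [pvInterleave_nil]
  | cons x xs => rw [pvInterleave_cons, pvInterleave_nil]

-- B's zip-fold + leftovers equals the interleaving
lemma pvFoldl_acc (l : List (Int × Int)) :
    ∀ acc : List Int, l.foldl (fun a p => a ++ [p.1, p.2]) acc = acc ++ l.foldl (fun a p => a ++ [p.1, p.2]) [] := by
  induction l with
  | nil => intro acc; simp
  | cons p t ih =>
    intro acc
    rw [List.foldl_cons, List.foldl_cons, ih (acc ++ [p.1, p.2]), ih ([] ++ [p.1, p.2])]
    simp

lemma pvZip_interleave : ∀ (l r : List Int),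
    ((l.zip r).foldl (fun acc p => acc ++ [p.1, p.2]) []) ++ l.drop (min l.length r.length) ++ r.drop (min l.length r.length) = pvInterleave l r := by
  intro l
  induction l with
  | nil => intro r; simp [pvInterleave_nil]
  | cons x xs ih =>
    intro r
    cases r with
    | nil => simp [pvInterleave_nil_right]
    | cons y ys =>
      simp only [List.zip_cons_cons, List.foldl]
      rw [pvFoldl_acc]
      simp only [List.length_cons]
      have : min (xs.length + 1) (ys.length + 1) = min xs.length ys.length + 1 := by omega
      rw [this]
      simp only [List.drop_succ_cons, List.nil_append, List.append_assoc]
      rw [pvInterleave_cons, pvInterleave_cons, ← ih ys]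
      simp

lemma pvLeftF_nil (start : Int) : ∀ (fuel : Nat) (i : Int), i = 100 - fuel → start - i < 0 → pvLeftF start i = [] := by
  intro fuel
  induction fuel with
  | zero => intro i hi _; simp [pvLeftF, PySem.List.pyRange_one_eq_nil (by omega : (100:Int) ≤ i)]
  | succ f ih =>
    intro i hi h
    rw [pvLeftF, PySem.List.pyRange_one_cons (by omega : i < 100)]
    simp only [List.filterMap_cons]
    rw [if_neg (by omega)]
    exact ih (i + 1) (by omega) (by omega)

lemma pvRightF_nil (start n : Int) : ∀ (fuel : Nat) (i : Int), i = 100 - fuel → start + i > n - 1 → pvRightF start n i = [] := by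
  intro fuel
  induction fuel with
  | zero => intro i hi _; simp [pvRightF, PySem.List.pyRange_one_eq_nil (by omega : (100:Int) ≤ i)]
  | succ f ih =>
    intro i hi h
    rw [pvRightF, PySem.List.pyRange_one_cons (by omega : i < 100)]
    simp only [List.filterMap_cons]
    rw [if_neg (by omega)]
    exact ih (i + 1) (by omega) (by omega)

lemma pvLeftF_cons (start i : Int) (h : i < 100) :
    pvLeftF start i = (if start - i ≥ 0 then [start - i] else []) ++ pvLeftF start (i + 1) := by
  rw [pvLeftF, PySem.List.pyRange_one_cons h]
  simp only [List.filterMap_cons]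
  split_ifs with h1 <;> simp [pvLeftF]

lemma pvRightF_cons (start n i : Int) (h : i < 100) :
    pvRightF start n i = (if start + i ≤ n - 1 then [start + i] else []) ++ pvRightF start n (i + 1) := by
  rw [pvRightF, PySem.List.pyRange_one_cons h]
  simp only [List.filterMap_cons]
  split_ifs with h1 <;> simp [pvRightF]

lemma pvMain (start n : Int) : ∀ (fuel : Nat) (i : Int) (sl sr : Bool), i = 100 - fuel →
    (sl = true → start - i < 0) → (sr = true → start + i > n - 1) →
    pvALoop start n (PySem.List.pyRange i 100 1) sl sr = pvInterleave (pvLeftF start i) (pvRightF start n i) := by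
  intro fuel
  induction fuel with
  | zero =>
    intro i sl sr hi _ _
    rw [PySem.List.pyRange_one_eq_nil (by omega : (100:Int) ≤ i)]
    simp [pvALoop, pvLeftF, pvRightF, PySem.List.pyRange_one_eq_nil (by omega : (100:Int) ≤ i), pvInterleave_nil]
  | succ f ih =>
    intro i sl sr hi h1 h2
    have hlt : i < 100 := by omega
    rw [PySem.List.pyRange_one_cons hlt]
    rw [pvALoop, pvLeftF_cons start i hlt, pvRightF_cons start n i hlt]
    by_cases c1 : start - i ≥ 0 <;> by_cases c2 : start + i ≤ n - 1
    · -- both sides continue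
      have hsl : sl = false := by cases sl; rfl; exact absurd (h1 rfl) (by omega)
      have hsr : sr = false := by cases sr; rfl; exact absurd (h2 rfl) (by omega)
      subst hsl; subst hsr
      simp only [if_pos c1, if_pos c2, Bool.and_false, if_neg (Bool.false_ne_true)]
      rw [ih (i + 1) false false (by omega) (by simp) (by simp)]
      simp [pvInterleave_cons, pvInterleave_nil, pvInterleave_nil_right]
    · -- right stops
      have hsl : sl = false := by cases sl; rfl; exact absurd (h1 rfl) (by omega)
      subst hsl
      simp only [if_pos c1, if_neg c2, Bool.true_and, if_neg (Bool.false_ne_true)]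
      rw [ih (i + 1) false true (by omega) (by simp) (fun _ => by omega)]
      rw [pvRightF_nil start n f (i + 1) (by omega) (by omega)]
      simp [pvInterleave_cons, pvInterleave_nil, pvInterleave_nil_right]
    · -- left stops
      have hsr : sr = false := by cases sr; rfl; exact absurd (h2 rfl) (by omega)
      subst hsr
      simp only [if_neg c1, if_pos c2, Bool.and_true, if_neg (Bool.false_ne_true)]
      rw [ih (i + 1) true false (by omega) (fun _ => by omega) (by simp)]
      rw [pvLeftF_nil start f (i + 1) (by omega) (by omega)]
      simp [pvInterleave_cons, pvInterleave_nil, pvInterleave_nil_right]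
    · -- both stop: break
      simp only [if_neg c1, if_neg c2, Bool.true_and]
      rw [pvLeftF_nil start f (i + 1) (by omega) (by omega),
          pvRightF_nil start n f (i + 1) (by omega) (by omega)]
      simp [pvInterleave_cons, pvInterleave_nil, pvInterleave_nil_right]

-- ===== VERDICT (by name: the statement is the Claim_ definition above) =====
theorem expanding_iteration_spec : Claim_equal_expanding_iteration := by
  intro words word debug _ hpre
  have hmem : word ∈ words := hpre
  obtain ⟨k, hk⟩ := Option.isSome_iff_exists.mp ((PySem.List.index?_isSome_iff words word).mpr hmem)
  have hA : expanding_iteration words word debug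
      = pvALoop (k : Int) (words.length : Int) (PySem.List.pyRange 1 100 1) false false := by
    unfold expanding_iteration; rw [hk]
  have hB : expanding_iteration_alt words word debug
      = pvInterleave (pvLeftF (k : Int) 1) (pvRightF (k : Int) (words.length : Int) 1) := by
    unfold expanding_iteration_alt; rw [hk, ← pvZip_interleave]; rfl
  unfold Spec_expanding_iteration
  rw [hA, hB]
  exact pvMain (k : Int) (words.length : Int) 99 1 false false (by norm_num) (by simp) (by simp)
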